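-- pv_equiv track=rewrite | github.com/romangorbunov91/zeros-poles-masks | utils/ZerosPolesDataset.py | positions_to_mask
-- ===== SOURCE A (Python) =====
-- def positions_to_mask(
--     positions,
--     total_bits: int,
--     halfwindow: int=0
--     ):
--
--     """Convert list of bit positions to an integer mask."""
--
--     mask = [0] * total_bits
--     for pos in positions:
--
--         start = max(0, pos - halfwindow)
--         end = min(total_bits, pos + halfwindow + 1)
--
--         mask[start:end] = [1] * (end - start)
--
--     return mask
-- ===== SOURCE B (Python) =====
-- def positions_to_mask(
--     positions,
--     total_bits: int,
--     halfwindow: int=0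
--     ):
--
--     """Convert list of bit positions to an integer mask."""
--
--     # Difference array: +1 at each window start, -1 past its end, then one
--     # prefix-sum pass; a bit is 1 where at least one window covers it.
--     diff = [0] * (total_bits + 1)
--     for pos in positions:
--         start = max(0, pos - halfwindow)
--         end = min(total_bits, pos + halfwindow + 1)
--         if start < end:
--             diff[start] += 1
--             diff[end] -= 1
--
--     mask = []
--     count = 0
--     for i in range(total_bits):
--         count += diff[i]
--         mask.append(1 if count > 0 else 0)
--     return mask
-- ===== Notes on version B (the rewrite author's own statement) =====
-- stated objective: faster
-- what changed: Replaces per-position writes of [1]*(end-start) into the mask by a difference array (+1 at window start, -1 at window end) followed by a single prefix-sum pass; Pre_ excludes inputs where a position's negative window end wraps to a nonempty slice, on which A's mask[start:end] = [] silently deletes elements and returns a list shorter than total_bits (not a total_bits-bit mask), which B's full-length mask cannot match.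
-- outside the precondition, e.g. on positions_to_mask([-3], 5, 0): A returns [0, 0], B returns [0, 0, 0, 0, 0]
import Mathlib
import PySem

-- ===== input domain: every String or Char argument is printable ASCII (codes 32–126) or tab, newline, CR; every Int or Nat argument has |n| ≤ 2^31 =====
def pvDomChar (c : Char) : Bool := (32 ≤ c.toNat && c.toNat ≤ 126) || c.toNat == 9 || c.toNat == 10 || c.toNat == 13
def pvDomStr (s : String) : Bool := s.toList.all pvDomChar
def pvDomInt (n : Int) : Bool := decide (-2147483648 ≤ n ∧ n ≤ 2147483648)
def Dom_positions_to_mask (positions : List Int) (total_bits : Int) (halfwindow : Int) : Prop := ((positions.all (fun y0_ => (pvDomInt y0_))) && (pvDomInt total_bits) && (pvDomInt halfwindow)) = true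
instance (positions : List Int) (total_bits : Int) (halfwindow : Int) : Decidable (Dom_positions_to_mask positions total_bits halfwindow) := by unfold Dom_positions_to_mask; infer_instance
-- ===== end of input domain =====

-- B replaces A's per-position slice writes of [1]*(end-start) by a difference array plus one
-- prefix-sum pass (asymptotically less work per position); inputs on which A's negative slice
-- end silently deletes mask elements are excluded by Pre_ below.

-- ===== PORT A =====
-- Python's normalization of a slice bound: a negative bound counts from the end, then clamp to [0, len].  Exact.
def pyClamp (len : Nat) (i : Int) : Nat := if i < 0 then ((len : Int) + i).toNat else min i.toNat len

-- Python `mask[s:e] = [1] * (e - s)` (hand-ported; PySem has no primitive for slice ASSIGNMENT):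
-- the slice [clamp s, max (clamp s) (clamp e)) is replaced by (e-s).toNat ones ([1]*k is empty for k ≤ 0).  Exact.
def sliceAssignOnes (mask : List Int) (s e : Int) : List Int :=
  mask.take (pyClamp mask.length s) ++ List.replicate (e - s).toNat 1 ++
    mask.drop (max (pyClamp mask.length s) (pyClamp mask.length e))

def positions_to_mask (positions : List Int) (total_bits : Int) (halfwindow : Int) : List Int :=
  positions.foldl
    (fun mask pos =>
      let start := max 0 (pos - halfwindow)
      let end_ := min total_bits (pos + halfwindow + 1)
      sliceAssignOnes mask start end_)
    (List.replicate total_bits.toNat 0)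

-- ===== PORT B =====
-- Source B: diff[start] += 1 / diff[end] -= 1 are in-range writes (0 ≤ start < end ≤ total_bits,
-- len(diff) = total_bits+1), so List.set / List.getD are exact here; diff[i] in the prefix-sum
-- loop has 0 ≤ i < total_bits < len(diff), so List.getD is exact there too.
def positions_to_mask_alt (positions : List Int) (total_bits : Int) (halfwindow : Int) : List Int :=
  let diff := positions.foldl
    (fun (d : List Int) pos =>
      let start := max 0 (pos - halfwindow)
      let end_ := min total_bits (pos + halfwindow + 1)
      if start < end_ then
        let d1 := d.set start.toNat (d.getD start.toNat 0 + 1)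
        d1.set end_.toNat (d1.getD end_.toNat 0 - 1)
      else d)
    (List.replicate (total_bits + 1).toNat 0)
  ((PySem.List.pyRange 0 total_bits 1).foldl
    (fun (mc : List Int × Int) i =>
      let c := mc.2 + diff.getD i.toNat 0
      (mc.1 ++ [if c > 0 then 1 else 0], c))
    ([], 0)).1

-- ===== PRECONDITION & SPEC =====
-- Pre_ excludes inputs containing a position whose window end pos+halfwindow+1 is negative yet
-- wraps (Python negative slice index) to a nonempty slice: there A's `mask[start:end] = []`
-- silently deletes part of the mask and returns a list SHORTER than total_bits — not a
-- total_bits-bit mask at all, which B's full-length mask cannot match.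
def Pre_positions_to_mask (positions : List Int) (total_bits : Int) (halfwindow : Int) : Prop :=
  ∀ pos ∈ positions, ¬(pos + halfwindow + 1 < 0 ∧
    0 < pos + halfwindow + 1 + total_bits ∧ 0 ≤ 2 * halfwindow + total_bits)
instance (positions : List Int) (total_bits : Int) (halfwindow : Int) : Decidable (Pre_positions_to_mask positions total_bits halfwindow) := by unfold Pre_positions_to_mask; infer_instance

def pvWitness_positions_to_mask : List Int × Int × Int := ([0, 3], 5, 1)

def Spec_positions_to_mask (positions : List Int) (total_bits : Int) (halfwindow : Int) (out : List Int) : Prop := out = positions_to_mask_alt positions total_bits halfwindow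
instance (positions : List Int) (total_bits : Int) (halfwindow : Int) (out : List Int) : Decidable (Spec_positions_to_mask positions total_bits halfwindow out) := by unfold Spec_positions_to_mask; infer_instance

-- ===== CLAIM (what is proved, stated in full; the proofs are below) =====
def Claim_equal_positions_to_mask : Prop := ∀ (positions : List Int) (total_bits : Int) (halfwindow : Int), Dom_positions_to_mask positions total_bits halfwindow → Pre_positions_to_mask positions total_bits halfwindow → Spec_positions_to_mask positions total_bits halfwindow (positions_to_mask positions total_bits halfwindow)

-- ===== LEMMAS AND PROOFS =====

-- window start / end of a position, and whether a window covers bit i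
def pS (hw p : Int) : Int := max 0 (p - hw)
def pE (tb hw p : Int) : Int := min tb (p + hw + 1)
def cov (tb hw p : Int) (i : Nat) : Bool := decide (pS hw p ≤ (i : Int) ∧ (i : Int) < pE tb hw p)

-- the common specification both programs compute (outside D_)
def specMask (positions : List Int) (tb hw : Int) : List Int :=
  (List.range tb.toNat).map (fun i => if positions.any (fun p => cov tb hw p i) then 1 else 0)

theorem ext_getD (xs ys : List Int) (hlen : xs.length = ys.length)
    (h : ∀ i, xs.getD i 0 = ys.getD i 0) : xs = ys := by
  apply List.ext_getElem hlen
  intro i h1 h2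
  have := h i
  rwa [List.getD_eq_getElem xs 0 h1, List.getD_eq_getElem ys 0 h2] at this

theorem getD_set (d : List Int) (a : Nat) (x : Int) (j : Nat) :
    (d.set a x).getD j 0 = if j = a ∧ a < d.length then x else d.getD j 0 := by
  by_cases hj : j = a
  · subst hj
    by_cases hl : j < d.length
    · rw [List.getD_eq_getElem _ _ (by simpa using hl), List.getElem_set_self, if_pos ⟨rfl, hl⟩]
    · rw [if_neg (by tauto)]
      rw [List.getD_eq_default _ _ (by simpa using Nat.le_of_not_lt hl),
        List.getD_eq_default _ _ (Nat.le_of_not_lt hl)]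
  · rw [if_neg (by tauto)]
    by_cases hl : j < d.length
    · rw [List.getD_eq_getElem _ _ (by simpa using hl), List.getD_eq_getElem _ _ hl,
        List.getElem_set_ne (by omega)]
    · rw [List.getD_eq_default _ _ (by simpa using Nat.le_of_not_lt hl),
        List.getD_eq_default _ _ (Nat.le_of_not_lt hl)]

theorem getD_take (xs : List Int) (k i : Nat) (h : i < k) :
    (xs.take k).getD i 0 = xs.getD i 0 := by
  by_cases hl : i < xs.length
  · rw [List.getD_eq_getElem _ _ (by simp; omega), List.getD_eq_getElem _ _ hl,
      List.getElem_take]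
  · rw [List.getD_eq_default _ _ (by simp; omega),
      List.getD_eq_default _ _ (Nat.le_of_not_lt hl)]

theorem getD_drop (xs : List Int) (k i : Nat) :
    (xs.drop k).getD i 0 = xs.getD (k + i) 0 := by
  by_cases hl : k + i < xs.length
  · rw [List.getD_eq_getElem _ _ (by simp; omega), List.getD_eq_getElem _ _ hl,
      List.getElem_drop]
  · rw [List.getD_eq_default _ _ (by simp; omega),
      List.getD_eq_default _ _ (by omega)]

theorem getD_replicate (n i : Nat) : (List.replicate n (1 : Int)).getD i 0 = if i < n then 1 else 0 := by
  by_cases h : i < n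
  · rw [List.getD_eq_getElem _ _ (by simpa using h), List.getElem_replicate, if_pos h]
  · rw [List.getD_eq_default _ _ (by simp; omega), if_neg h]

theorem getD_replicate_zero (n i : Nat) : (List.replicate n (0 : Int)).getD i 0 = 0 := by
  by_cases h : i < n
  · rw [List.getD_eq_getElem _ _ (by simpa using h), List.getElem_replicate]
  · rw [List.getD_eq_default _ _ (by simp; omega)]

theorem slice_char (mask : List Int) (tb s e : Int) (hlen : (mask.length : Int) = max tb 0)
    (hs : 0 ≤ s) (he : e ≤ tb) (hnd : ¬(e < 0 ∧ s < e + tb)) :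
    (sliceAssignOnes mask s e).length = mask.length ∧
      ∀ i : Nat, (sliceAssignOnes mask s e).getD i 0 =
        if s ≤ (i : Int) ∧ (i : Int) < e then 1 else mask.getD i 0 := by
  unfold sliceAssignOnes pyClamp
  by_cases he0 : e < 0
  · -- no-op: the replacement is empty and the wrapped slice is empty (e + tb ≤ s outside D_)
    have hse : e + tb ≤ s := by by_contra hc; exact hnd ⟨he0, by omega⟩
    have hrep : (e - s).toNat = 0 := by omega
    have hmax : max (if s < 0 then ((mask.length : Int) + s).toNat else min s.toNat mask.length)
        (if e < 0 then ((mask.length : Int) + e).toNat else min e.toNat mask.length)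
        = (if s < 0 then ((mask.length : Int) + s).toNat else min s.toNat mask.length) := by
      rw [if_neg (by omega), if_pos he0]; omega
    rw [hmax, hrep, List.replicate_zero, List.append_nil, List.take_append_drop]
    refine ⟨rfl, fun i => ?_⟩
    rw [if_neg (by omega)]
  · -- e ≥ 0, hence tb ≥ 0 and both clamps are plain min's
    have htb : 0 ≤ tb := by omega
    have hL : (mask.length : Int) = tb := by omega
    rw [if_neg (by omega), if_neg (by omega)]
    by_cases hes : e ≤ s
    · -- empty write: replacement empty, slice empty
      have hrep : (e - s).toNat = 0 := by omega
      have hmax : max (min s.toNat mask.length) (min e.toNat mask.length)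
          = min s.toNat mask.length := by omega
      rw [hmax, hrep, List.replicate_zero, List.append_nil, List.take_append_drop]
      refine ⟨rfl, fun i => ?_⟩
      rw [if_neg (by omega)]
    · -- genuine write over [s, e)
      have hslt : s < e := by omega
      have hmins : min s.toNat mask.length = s.toNat := by omega
      have hmax : max (min s.toNat mask.length) (min e.toNat mask.length) = e.toNat := by omega
      rw [hmax, hmins]
      have hlt : (mask.take s.toNat).length = s.toNat := by simp; omega
      have hLR : (mask.take s.toNat ++ List.replicate (e - s).toNat (1 : Int)).length
          = s.toNat + (e - s).toNat := by simp; omega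
      constructor
      · simp only [List.length_append, List.length_take, List.length_replicate,
          List.length_drop]
        omega
      · intro i
        by_cases h1 : i < s.toNat
        · rw [List.getD_append _ _ _ _ (by rw [hLR]; omega),
            List.getD_append _ _ _ _ (by rw [hlt]; omega), getD_take _ _ _ h1,
            if_neg (by omega)]
        · by_cases h2 : i < e.toNat
          · rw [List.getD_append _ _ _ _ (by rw [hLR]; omega),
              List.getD_append_right _ _ _ _ (by rw [hlt]; omega), hlt, getD_replicate,
              if_pos (by omega), if_pos (by constructor <;> omega)]
          · rw [List.getD_append_right _ _ _ _ (by rw [hLR]; omega), hLR, getD_drop,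
              if_neg (by omega)]
            congr 1
            omega

theorem A_fold (tb hw : Int) (l : List Int) (mask : List Int) (hlen : (mask.length : Int) = max tb 0)
    (hnd : ∀ p ∈ l, ¬(pE tb hw p < 0 ∧ pS hw p < pE tb hw p + tb)) :
    (l.foldl (fun mask pos =>
        let start := max 0 (pos - hw)
        let end_ := min tb (pos + hw + 1)
        sliceAssignOnes mask start end_) mask).length = mask.length ∧
      ∀ i : Nat, (l.foldl (fun mask pos =>
        let start := max 0 (pos - hw)
        let end_ := min tb (pos + hw + 1)
        sliceAssignOnes mask start end_) mask).getD i 0 =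
          if l.any (fun p => cov tb hw p i) then 1 else mask.getD i 0 := by
  induction l generalizing mask with
  | nil => exact ⟨rfl, fun i => by simp⟩
  | cons p l ih =>
    have hp := hnd p (by simp)
    have hsc := slice_char mask tb (pS hw p) (pE tb hw p) hlen (le_max_left _ _)
      (min_le_left _ _) hp
    have hlen' : ((sliceAssignOnes mask (pS hw p) (pE tb hw p)).length : Int) = max tb 0 := by
      rw [hsc.1]; exact hlen
    have hih := ih (sliceAssignOnes mask (pS hw p) (pE tb hw p)) hlen'
      (fun q hq => hnd q (by simp [hq]))
    simp only [List.foldl_cons]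
    refine ⟨hih.1.trans hsc.1, fun i => ?_⟩
    have key : (List.foldl (fun mask pos => sliceAssignOnes mask (max 0 (pos - hw)) (min tb (pos + hw + 1)))
        (sliceAssignOnes mask (max 0 (p - hw)) (min tb (p + hw + 1))) l).getD i 0 =
        if (l.any fun q => cov tb hw q i) = true then 1
        else (sliceAssignOnes mask (pS hw p) (pE tb hw p)).getD i 0 := hih.2 i
    rw [key, hsc.2 i, List.any_cons]
    by_cases hc : cov tb hw p i = true
    · have hq : pS hw p ≤ (i : Int) ∧ (i : Int) < pE tb hw p := by simpa [cov] using hc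
      simp [hc, hq]
    · have hq : ¬(pS hw p ≤ (i : Int) ∧ (i : Int) < pE tb hw p) := by simpa [cov] using hc
      simp [hc, hq]

theorem getD_map_range (f : Nat → Int) (n i : Nat) :
    ((List.range n).map f).getD i 0 = if i < n then f i else 0 := by
  by_cases h : i < n
  · rw [List.getD_eq_getElem _ _ (by simpa using h), if_pos h]
    simp
  · rw [List.getD_eq_default _ _ (by simp; omega), if_neg h]

theorem cov_out (tb hw p : Int) (i : Nat) (h : ¬ i < tb.toNat) : cov tb hw p i = false := by
  simp only [cov, pS, pE, decide_eq_false_iff_not]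
  omega

theorem A_spec (positions : List Int) (tb hw : Int)
    (hnd : ∀ p ∈ positions, ¬(pE tb hw p < 0 ∧ pS hw p < pE tb hw p + tb)) :
    positions_to_mask positions tb hw = specMask positions tb hw := by
  unfold positions_to_mask
  have hlen : ((List.replicate tb.toNat (0 : Int)).length : Int) = max tb 0 := by
    rw [List.length_replicate]; omega
  obtain ⟨h1, h2⟩ := A_fold tb hw positions (List.replicate tb.toNat 0) hlen hnd
  apply ext_getD
  · rw [h1]
    simp [specMask]
  · intro i
    rw [h2 i, getD_replicate_zero]
    unfold specMask
    rw [getD_map_range]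
    by_cases h : i < tb.toNat
    · rw [if_pos h]
    · rw [if_neg h]
      have : positions.any (fun p => cov tb hw p i) = false := by
        rw [List.any_eq_false]
        exact fun p _ => by simp [cov_out tb hw p i h]
      simp [this]

-- B side: contribution of the remaining positions to diff[j]
def cnum (tb hw : Int) (l : List Int) (j : Nat) : Int :=
  (l.map (fun p => if pS hw p < pE tb hw p then
      (if (pS hw p).toNat = j then (1 : Int) else 0) +
      (if (pE tb hw p).toNat = j then (-1 : Int) else 0)
    else 0)).sum

theorem B_diff (tb hw : Int) (l : List Int) (d : List Int) (hlen : d.length = (tb + 1).toNat) :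
    (l.foldl (fun (d : List Int) pos =>
        let start := max 0 (pos - hw)
        let end_ := min tb (pos + hw + 1)
        if start < end_ then
          let d1 := d.set start.toNat (d.getD start.toNat 0 + 1)
          d1.set end_.toNat (d1.getD end_.toNat 0 - 1)
        else d) d).length = d.length ∧
      ∀ j : Nat, (l.foldl (fun (d : List Int) pos =>
        let start := max 0 (pos - hw)
        let end_ := min tb (pos + hw + 1)
        if start < end_ then
          let d1 := d.set start.toNat (d.getD start.toNat 0 + 1)
          d1.set end_.toNat (d1.getD end_.toNat 0 - 1)
        else d) d).getD j 0 = d.getD j 0 + cnum tb hw l j := by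
  induction l generalizing d with
  | nil => exact ⟨rfl, fun j => by simp [cnum]⟩
  | cons p l ih =>
    simp only [List.foldl_cons]
    by_cases hc : max 0 (p - hw) < min tb (p + hw + 1)
    · rw [if_pos hc]
      have ha : (max 0 (p - hw)).toNat < d.length := by rw [hlen]; omega
      have hb : (min tb (p + hw + 1)).toNat < d.length := by rw [hlen]; omega
      have hab : (max 0 (p - hw)).toNat ≠ (min tb (p + hw + 1)).toNat := by omega
      have hd1 : ∀ j, (d.set (max 0 (p - hw)).toNat (d.getD (max 0 (p - hw)).toNat 0 + 1)).getD j 0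
          = d.getD j 0 + (if (max 0 (p - hw)).toNat = j then 1 else 0) := by
        intro j
        rw [getD_set]
        by_cases hj : j = (max 0 (p - hw)).toNat
        · rw [if_pos ⟨hj, ha⟩, if_pos hj.symm, hj]
        · rw [if_neg (by tauto), if_neg (fun h => hj h.symm), add_zero]
      have hlen1 : (d.set (max 0 (p - hw)).toNat (d.getD (max 0 (p - hw)).toNat 0 + 1)).length
          = d.length := by simp
      have hd2 : ∀ j, ((d.set (max 0 (p - hw)).toNat (d.getD (max 0 (p - hw)).toNat 0 + 1)).set
            (min tb (p + hw + 1)).toNat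
            ((d.set (max 0 (p - hw)).toNat (d.getD (max 0 (p - hw)).toNat 0 + 1)).getD
              (min tb (p + hw + 1)).toNat 0 - 1)).getD j 0
          = d.getD j 0 + ((if (max 0 (p - hw)).toNat = j then 1 else 0)
              + (if (min tb (p + hw + 1)).toNat = j then (-1 : Int) else 0)) := by
        intro j
        rw [getD_set, hd1 (min tb (p + hw + 1)).toNat, if_neg hab, add_zero]
        by_cases hj : j = (min tb (p + hw + 1)).toNat
        · rw [if_pos ⟨hj, by rw [hlen1]; exact hb⟩, hj, if_neg hab, if_pos rfl]
          ring
        · rw [if_neg (by tauto), hd1 j,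
            if_neg (show ¬((min tb (p + hw + 1)).toNat = j) from fun h => hj h.symm)]
          ring
      have hlen2 : ((d.set (max 0 (p - hw)).toNat (d.getD (max 0 (p - hw)).toNat 0 + 1)).set
            (min tb (p + hw + 1)).toNat
            ((d.set (max 0 (p - hw)).toNat (d.getD (max 0 (p - hw)).toNat 0 + 1)).getD
              (min tb (p + hw + 1)).toNat 0 - 1)).length = d.length := by simp
      obtain ⟨ih1, ih2⟩ := ih ((d.set (max 0 (p - hw)).toNat (d.getD (max 0 (p - hw)).toNat 0 + 1)).set
            (min tb (p + hw + 1)).toNat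
            ((d.set (max 0 (p - hw)).toNat (d.getD (max 0 (p - hw)).toNat 0 + 1)).getD
              (min tb (p + hw + 1)).toNat 0 - 1)) (by rw [hlen2, hlen])
      refine ⟨ih1.trans hlen2, fun j => ?_⟩
      rw [ih2 j, hd2 j]
      have hcn : cnum tb hw (p :: l) j = ((if (max 0 (p - hw)).toNat = j then 1 else 0)
          + (if (min tb (p + hw + 1)).toNat = j then (-1 : Int) else 0)) + cnum tb hw l j := by
        simp only [cnum, List.map_cons, List.sum_cons]
        rw [if_pos (show pS hw p < pE tb hw p from hc)]
        rfl
      rw [hcn]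
      ring
    · rw [if_neg hc]
      obtain ⟨ih1, ih2⟩ := ih d hlen
      refine ⟨ih1, fun j => ?_⟩
      rw [ih2 j]
      have hcn : cnum tb hw (p :: l) j = cnum tb hw l j := by
        simp only [cnum, List.map_cons, List.sum_cons]
        rw [if_neg (show ¬ pS hw p < pE tb hw p from hc), zero_add]
      rw [hcn]

-- prefix sum of a diff list
def pSum (d : List Int) (m : Nat) : Int := ((List.range m).map (fun j => d.getD j 0)).sum

theorem pSum_succ (d : List Int) (m : Nat) : pSum d (m + 1) = pSum d m + d.getD m 0 := by
  simp [pSum, List.range_succ]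

theorem range_indicator (m a : Nat) (c : Int) :
    ((List.range m).map (fun j => if a = j then c else 0)).sum = if a < m then c else 0 := by
  induction m with
  | zero => simp
  | succ n ih =>
    rw [List.range_succ, List.map_append, List.sum_append, ih]
    by_cases h1 : a < n
    · simp [h1, Nat.lt_succ_of_lt h1, show a ≠ n by omega]
    · by_cases h2 : a = n <;> simp [h1, h2] <;> omega

theorem sum_map_add (xs : List Nat) (f g : Nat → Int) :
    (xs.map (fun j => f j + g j)).sum = (xs.map f).sum + (xs.map g).sum := by
  induction xs with
  | nil => simp
  | cons x xs ih => simp only [List.map_cons, List.sum_cons, ih]; ring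

theorem pSum_cnum (tb hw : Int) (l : List Int) (m : Nat) :
    ((List.range m).map (fun j => cnum tb hw l j)).sum =
      (l.map (fun p => if pS hw p < pE tb hw p then
          (if (pS hw p).toNat < m then (1 : Int) else 0) +
          (if (pE tb hw p).toNat < m then (-1 : Int) else 0)
        else 0)).sum := by
  induction l with
  | nil => simp [cnum]
  | cons p l ih =>
    have hcons : ∀ j : Nat, cnum tb hw (p :: l) j = (if pS hw p < pE tb hw p then
        (if (pS hw p).toNat = j then (1 : Int) else 0) +
        (if (pE tb hw p).toNat = j then (-1 : Int) else 0) else 0) + cnum tb hw l j := by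
      intro j; simp [cnum]
    simp only [hcons]
    rw [sum_map_add, ih, List.map_cons, List.sum_cons]
    congr 1
    by_cases hpc : pS hw p < pE tb hw p
    · simp only [if_pos hpc]
      rw [sum_map_add, range_indicator, range_indicator]
    · simp [hpc]

theorem sum_ite_nonneg (l : List Int) (q : Int → Bool) :
    0 ≤ (l.map (fun p => if q p then (1 : Int) else 0)).sum := by
  induction l with
  | nil => simp
  | cons p l ih =>
    simp only [List.map_cons, List.sum_cons]
    by_cases h : q p <;> simp [h] <;> linarith

theorem sum_ite_pos (l : List Int) (q : Int → Bool) :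
    (0 < (l.map (fun p => if q p then (1 : Int) else 0)).sum) ↔ l.any q = true := by
  induction l with
  | nil => simp
  | cons p l ih =>
    simp only [List.map_cons, List.sum_cons, List.any_cons]
    have hnn := sum_ite_nonneg l q
    by_cases h : q p
    · constructor
      · intro _; simp [h]
      · intro _; rw [if_pos h]; linarith
    · simp only [h, Bool.false_or]
      rw [if_neg Bool.false_ne_true, zero_add]
      exact ih

theorem B_assemble (positions : List Int) (tb hw : Int) (df : List Int)
    (hdg : ∀ j : Nat, df.getD j 0 = cnum tb hw positions j) :
    ((PySem.List.pyRange 0 tb 1).foldl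
      (fun (mc : List Int × Int) i =>
        let c := mc.2 + df.getD i.toNat 0
        (mc.1 ++ [if c > 0 then 1 else 0], c))
      ([], 0)).1 = specMask positions tb hw := by
  have hloop : ∀ n : Nat, (((List.range n).map (fun k : Nat => (k : Int))).foldl
      (fun (mc : List Int × Int) i =>
        let c := mc.2 + df.getD i.toNat 0
        (mc.1 ++ [if c > 0 then 1 else 0], c))
      ([], 0)) = ((List.range n).map (fun i => if pSum df (i + 1) > 0 then (1 : Int) else 0),
        pSum df n) := by
    intro n
    induction n with
    | zero => simp [pSum]
    | succ m ih =>
      rw [List.range_succ, List.map_append, List.foldl_append, ih, List.map_append]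
      simp only [List.map_cons, List.map_nil, List.foldl_cons, List.foldl_nil]
      rw [Int.toNat_natCast, ← pSum_succ]
  have hrg : PySem.List.pyRange 0 tb 1 = (List.range tb.toNat).map (fun k : Nat => (k : Int)) := by
    rw [PySem.List.pyRange_one]
    simp
  rw [hrg, hloop tb.toNat]
  unfold specMask
  apply List.map_congr_left
  intro i hi
  have hi' : i < tb.toNat := List.mem_range.mp hi
  have hcov : ∀ p : Int, (cov tb hw p i = true) ↔ (pS hw p ≤ (i : Int) ∧ (i : Int) < pE tb hw p) := by
    intro p; simp [cov]
  have h1 : pSum df (i + 1) = (positions.map (fun p => if cov tb hw p i then (1 : Int) else 0)).sum := by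
    unfold pSum
    simp only [hdg]
    rw [pSum_cnum]
    apply congrArg List.sum
    apply List.map_congr_left
    intro p _
    have hps : 0 ≤ pS hw p := le_max_left _ _
    by_cases hpc : pS hw p < pE tb hw p
    · rw [if_pos hpc]
      by_cases hcv : cov tb hw p i
      · have hc2 := (hcov p).mp hcv
        rw [if_pos (by omega), if_neg (by omega), if_pos hcv]
        norm_num
      · have hc2 : ¬(pS hw p ≤ (i : Int) ∧ (i : Int) < pE tb hw p) := fun h => hcv ((hcov p).mpr h)
        rw [if_neg hcv]
        by_cases h3 : pE tb hw p ≤ (i : Int)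
        · rw [if_pos (by omega), if_pos (by omega)]
          norm_num
        · rw [if_neg (by omega), if_neg (by omega)]
          norm_num
    · rw [if_neg hpc]
      have : cov tb hw p i = false := by
        simp only [cov, decide_eq_false_iff_not]
        intro h
        exact hpc (lt_of_le_of_lt h.1 h.2)
      simp [this]
  rw [h1]
  by_cases hany : positions.any (fun p => cov tb hw p i) = true
  · rw [if_pos ((sum_ite_pos _ _).mpr hany), if_pos hany]
  · rw [if_neg (fun h => hany ((sum_ite_pos _ _).mp h)), if_neg hany]

theorem B_spec (positions : List Int) (tb hw : Int) :
    positions_to_mask_alt positions tb hw = specMask positions tb hw := by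
  unfold positions_to_mask_alt
  obtain ⟨hdl, hdg⟩ := B_diff tb hw positions (List.replicate (tb + 1).toNat 0) (by simp)
  exact B_assemble positions tb hw _ (fun j => by rw [hdg j, getD_replicate_zero, zero_add])

-- ===== VERDICT (by name: the statement is the Claim_ definition above) =====
theorem positions_to_mask_spec : Claim_equal_positions_to_mask := by
  intro positions tb hw _hdom hpre
  have hnd : ∀ p ∈ positions, ¬(pE tb hw p < 0 ∧ pS hw p < pE tb hw p + tb) := by
    intro p hp hc
    simp only [pS, pE] at hc
    exact hpre p hp ⟨by omega, by omega, by omega⟩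
  show positions_to_mask positions tb hw = positions_to_mask_alt positions tb hw
  rw [A_spec positions tb hw hnd, B_spec positions tb hw]
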